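-- pv_equiv track=rewrite | github.com/floatingcorn233/advent_code_of_2015 | day_02 P2.py | giftsender
-- ===== SOURCE A (Python) =====
-- def giftsender(route):
--     x=0
--     y=0
--     locations = {(0, 0)}
--     for direction in route:
--         if direction == '<':
--             x=x-1
--         elif direction == '>':
--             x=x+1
--         elif direction == '^':
--             y=y+1
--         elif direction == 'v':
--             y=y-1
--         locations.add((x,y))
--     return locations
-- ===== SOURCE B (Python) =====
-- def prefix_sums(deltas):
--     total = 0
--     out = [0]
--     for d in deltas:
--         total += d
--         out.append(total)
--     return out
--
--
-- def giftsender(route):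
--     dx = [(c == '>') - (c == '<') for c in route]
--     dy = [(c == '^') - (c == 'v') for c in route]
--     return set(zip(prefix_sums(dx), prefix_sums(dy)))
-- ===== Notes on version B (the rewrite author's own statement) =====
-- stated objective: alternative
-- what changed: Instead of one stateful walk with an elif chain mutating (x,y) and adding to a set, B computes the x- and y-coordinate sequences independently as prefix sums of per-axis delta lists, zips them into the visited positions and deduplicates once with set().
import Mathlib
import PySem

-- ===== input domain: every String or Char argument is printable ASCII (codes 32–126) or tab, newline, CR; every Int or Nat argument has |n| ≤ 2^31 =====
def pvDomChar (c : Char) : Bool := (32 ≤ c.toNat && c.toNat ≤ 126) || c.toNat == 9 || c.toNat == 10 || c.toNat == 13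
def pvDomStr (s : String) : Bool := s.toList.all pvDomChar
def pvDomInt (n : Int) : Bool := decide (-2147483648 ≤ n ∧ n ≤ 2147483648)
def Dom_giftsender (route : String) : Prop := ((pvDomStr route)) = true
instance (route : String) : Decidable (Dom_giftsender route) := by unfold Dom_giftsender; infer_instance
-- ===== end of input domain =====

-- B replaces A's single stateful (x,y) walk with an elif chain by two independent
-- per-axis prefix sums that are zipped into the visited positions (alternative; same cost).

-- ===== PORT A =====
def giftsenderStepA (s : Int × Int × PySem.Set (Int × Int)) (c : Char) :
    Int × Int × PySem.Set (Int × Int) :=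
  let x := s.1
  let y := s.2.1
  let locations := s.2.2
  let xy : Int × Int :=
    if c = '<' then (x - 1, y)
    else if c = '>' then (x + 1, y)
    else if c = '^' then (x, y + 1)
    else if c = 'v' then (x, y - 1)
    else (x, y)
  (xy.1, xy.2, locations.add (xy.1, xy.2))

def giftsender (route : String) : List (Int × Int) :=
  (route.toList.foldl giftsenderStepA (0, 0, PySem.Set.add PySem.Set.empty (0, 0))).2.2

-- ===== PORT B =====
-- prefix_sums: running total, out starts [0], append total after each delta
def prefixSums (deltas : List Int) : List Int :=
  (deltas.foldl (fun s d => (s.1 + d, s.2 ++ [s.1 + d])) ((0 : Int), [(0 : Int)])).2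

-- (c == '>') - (c == '<')  /  (c == '^') - (c == 'v')  (bool arithmetic)
def giftsenderDx (c : Char) : Int := (if c = '>' then 1 else 0) - (if c = '<' then 1 else 0)
def giftsenderDy (c : Char) : Int := (if c = '^' then 1 else 0) - (if c = 'v' then 1 else 0)

def giftsender_alt (route : String) : List (Int × Int) :=
  PySem.Set.ofList
    (List.zip (prefixSums (route.toList.map giftsenderDx))
              (prefixSums (route.toList.map giftsenderDy)))

-- ===== PRECONDITION & SPEC =====
def Spec_giftsender (route : String) (out : List (Int × Int)) : Prop := out = giftsender_alt route
instance (route : String) (out : List (Int × Int)) : Decidable (Spec_giftsender route out) := by unfold Spec_giftsender; infer_instance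

-- ===== CLAIM (what is proved, stated in full; the proofs are below) =====
def Claim_equal_giftsender : Prop := ∀ (route : String), Dom_giftsender route → Spec_giftsender route (giftsender route)

-- ===== LEMMAS AND PROOFS =====

-- the list of positions visited after each character, starting from (x, y)
def giftsenderWalk (x y : Int) : List Char → List (Int × Int)
  | [] => []
  | c :: cs =>
    (x + giftsenderDx c, y + giftsenderDy c) ::
      giftsenderWalk (x + giftsenderDx c) (y + giftsenderDy c) cs

-- the running totals of a delta list, starting from t
def giftsenderScan (t : Int) : List Int → List Int
  | [] => []
  | d :: ds => (t + d) :: giftsenderScan (t + d) ds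

lemma prefixSums_fold (ds : List Int) :
    ∀ (t : Int) (out : List Int),
      (ds.foldl (fun s d => (s.1 + d, s.2 ++ [s.1 + d])) (t, out)).2 =
        out ++ giftsenderScan t ds := by
  induction ds with
  | nil => intro t out; simp [giftsenderScan]
  | cons d ds ih =>
    intro t out
    simp only [List.foldl_cons, giftsenderScan]
    rw [ih]
    simp

lemma zip_scan (cs : List Char) :
    ∀ (x y : Int),
      List.zip (giftsenderScan x (cs.map giftsenderDx))
               (giftsenderScan y (cs.map giftsenderDy)) = giftsenderWalk x y cs := by
  induction cs with
  | nil => intro x y; rfl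
  | cons c cs ih =>
    intro x y
    simp only [List.map_cons, giftsenderScan, giftsenderWalk, List.zip_cons_cons]
    rw [ih]

lemma stepA_pos (x y : Int) (c : Char) :
    ((if c = '<' then ((x - 1, y) : Int × Int)
      else if c = '>' then (x + 1, y)
      else if c = '^' then (x, y + 1)
      else if c = 'v' then (x, y - 1)
      else (x, y))) = (x + giftsenderDx c, y + giftsenderDy c) := by
  unfold giftsenderDx giftsenderDy
  rcases eq_or_ne c '<' with h1 | h1
  · subst h1; simp; ring
  rcases eq_or_ne c '>' with h2 | h2
  · subst h2; simp
  rcases eq_or_ne c '^' with h3 | h3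
  · subst h3; simp
  rcases eq_or_ne c 'v' with h4 | h4
  · subst h4; simp; ring
  simp [h1, h2, h3, h4]

lemma foldA_walk (cs : List Char) :
    ∀ (x y : Int) (path : List (Int × Int)),
      (cs.foldl giftsenderStepA (x, y, PySem.Set.ofList path)).2.2 =
        PySem.Set.ofList (path ++ giftsenderWalk x y cs) := by
  induction cs with
  | nil => intro x y path; simp [giftsenderWalk]
  | cons c cs ih =>
    intro x y path
    simp only [List.foldl_cons, giftsenderStepA]
    rw [stepA_pos]
    have hadd : (PySem.Set.ofList path).add (x + giftsenderDx c, y + giftsenderDy c) =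
        PySem.Set.ofList (path ++ [(x + giftsenderDx c, y + giftsenderDy c)]) := by
      simp [PySem.Set.ofList_eq_foldl, List.foldl_append]
    simp only [giftsenderWalk]
    rw [hadd, ih]
    simp

-- ===== VERDICT (by name: the statement is the Claim_ definition above) =====
theorem giftsender_spec : Claim_equal_giftsender := by
  intro route _
  unfold Spec_giftsender giftsender giftsender_alt prefixSums
  rw [prefixSums_fold, prefixSums_fold]
  have h0 : PySem.Set.add PySem.Set.empty ((0 : Int), (0 : Int)) =
      PySem.Set.ofList [((0 : Int), (0 : Int))] := by decide
  rw [h0, foldA_walk]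
  simp only [List.singleton_append, List.zip_cons_cons, zip_scan]
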